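-- pv_equiv track=rewrite | github.com/baiyajin/MyWeChat | server/app/utils/license_generator.py | is_valid_license_key
-- ===== SOURCE A (Python) =====
-- def is_valid_license_key(license_key: str) -> bool:
--     """
--     验证授权码格式是否有效
--
--     Args:
--         license_key: 授权码字符串
--
--     Returns:
--         bool: 是否有效
--     """
--     if not license_key or len(license_key) != 20:
--         return False
--
--     # 检查是否包含至少一个大写字母、小写字母、数字和特殊符号
--     has_upper = any(c.isupper() for c in license_key)
--     has_lower = any(c.islower() for c in license_key)
--     has_digit = any(c.isdigit() for c in license_key)
--     has_special = any(c in "!@#$%^&*" for c in license_key)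
--
--     return has_upper and has_lower and has_digit and has_special
-- ===== SOURCE B (Python) =====
-- def is_valid_license_key(license_key: str) -> bool:
--     if not license_key or len(license_key) != 20:
--         return False
--     has_upper = has_lower = has_digit = has_special = False
--     for c in license_key:
--         if c.isupper():
--             has_upper = True
--         elif c.islower():
--             has_lower = True
--         elif c.isdigit():
--             has_digit = True
--         elif c in "!@#$%^&*":
--             has_special = True
--         if has_upper and has_lower and has_digit and has_special:
--             return True
--     return False
-- ===== Notes on version B (the rewrite author's own statement) =====
-- stated objective: alternative
-- what changed: Replaces A's four separate any() scans over the key with a single pass that maintains four boolean flags and returns early once all four are set.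
import Mathlib
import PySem

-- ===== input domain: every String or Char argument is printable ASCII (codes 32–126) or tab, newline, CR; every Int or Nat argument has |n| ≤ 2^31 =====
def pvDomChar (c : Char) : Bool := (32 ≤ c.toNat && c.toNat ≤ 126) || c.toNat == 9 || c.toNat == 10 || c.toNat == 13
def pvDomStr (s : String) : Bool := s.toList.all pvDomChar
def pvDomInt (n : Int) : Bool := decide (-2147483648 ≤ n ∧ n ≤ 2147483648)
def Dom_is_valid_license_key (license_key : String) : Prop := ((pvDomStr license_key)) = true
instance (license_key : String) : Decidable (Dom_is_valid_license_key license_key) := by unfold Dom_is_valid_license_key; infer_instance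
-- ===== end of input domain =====

-- B replaces A's four separate any-scans with one pass maintaining four boolean flags
-- (early exit once all are set); same return value on every input (objective: alternative).


-- ===== PORT A =====
def pvSpecial (c : Char) : Bool := "!@#$%^&*".toList.contains c

def is_valid_license_key (license_key : String) : Bool :=
  if license_key.toList = [] ∨ PySem.Str.len license_key ≠ 20 then false
  else
    let has_upper := license_key.toList.any PySem.Chars.isupper
    let has_lower := license_key.toList.any PySem.Chars.islower
    let has_digit := license_key.toList.any PySem.Chars.isdigit
    let has_special := license_key.toList.any pvSpecial
    has_upper && has_lower && has_digit && has_special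

-- ===== PORT B =====
-- the single-pass flag loop of Source B, with its early exit
def pvFlagLoop : List Char → Bool → Bool → Bool → Bool → Bool
  | [], _, _, _, _ => false
  | c :: rest, hu, hl, hd, hs =>
    let st : Bool × Bool × Bool × Bool :=
      if PySem.Chars.isupper c then (true, hl, hd, hs)
      else if PySem.Chars.islower c then (hu, true, hd, hs)
      else if PySem.Chars.isdigit c then (hu, hl, true, hs)
      else if pvSpecial c then (hu, hl, hd, true)
      else (hu, hl, hd, hs)
    if st.1 && st.2.1 && st.2.2.1 && st.2.2.2 then true
    else pvFlagLoop rest st.1 st.2.1 st.2.2.1 st.2.2.2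

def is_valid_license_key_alt (license_key : String) : Bool :=
  if license_key.toList = [] ∨ PySem.Str.len license_key ≠ 20 then false
  else pvFlagLoop license_key.toList false false false false

-- ===== PRECONDITION & SPEC =====
def Spec_is_valid_license_key (license_key : String) (out : Bool) : Prop := out = is_valid_license_key_alt license_key
instance (license_key : String) (out : Bool) : Decidable (Spec_is_valid_license_key license_key out) := by unfold Spec_is_valid_license_key; infer_instance

-- ===== CLAIM (what is proved, stated in full; the proofs are below) =====
def Claim_equal_is_valid_license_key : Prop := ∀ (license_key : String), Dom_is_valid_license_key license_key → Spec_is_valid_license_key license_key (is_valid_license_key license_key)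

-- ===== LEMMAS AND PROOFS =====

-- the four character classes are pairwise disjoint
theorem pvUL (c : Char) : PySem.Chars.isupper c → PySem.Chars.islower c = false := by
  simp [PySem.Chars.isupper, PySem.Chars.islower, Char.le_def, UInt32.le_iff_toNat_le]
  omega

theorem pvUD (c : Char) : PySem.Chars.isupper c → PySem.Chars.isdigit c = false := by
  simp [PySem.Chars.isupper, PySem.Chars.isdigit, Char.le_def, UInt32.le_iff_toNat_le]
  omega

theorem pvLD (c : Char) : PySem.Chars.islower c → PySem.Chars.isdigit c = false := by
  simp [PySem.Chars.islower, PySem.Chars.isdigit, Char.le_def, UInt32.le_iff_toNat_le]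
  omega

theorem pvUS (c : Char) : PySem.Chars.isupper c → pvSpecial c = false := by
  simp [PySem.Chars.isupper, pvSpecial, Char.le_def, Char.ext_iff, UInt32.le_iff_toNat_le, ← UInt32.toNat_inj]
  omega

theorem pvLS (c : Char) : PySem.Chars.islower c → pvSpecial c = false := by
  simp [PySem.Chars.islower, pvSpecial, Char.le_def, Char.ext_iff, UInt32.le_iff_toNat_le, ← UInt32.toNat_inj]
  omega

theorem pvDS (c : Char) : PySem.Chars.isdigit c → pvSpecial c = false := by
  simp [PySem.Chars.isdigit, pvSpecial, Char.le_def, Char.ext_iff, UInt32.le_iff_toNat_le, ← UInt32.toNat_inj]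
  omega

-- the flag loop returns, on a nonempty list, the conjunction of the four any-scans
-- (on [] it returns false regardless of the flags, matching Source B's final `return False`)
theorem pvFlagLoop_eq (l : List Char) : ∀ hu hl hd hs,
    pvFlagLoop l hu hl hd hs =
      (decide (l ≠ []) && ((hu || l.any PySem.Chars.isupper) && (hl || l.any PySem.Chars.islower) &&
       (hd || l.any PySem.Chars.isdigit) && (hs || l.any pvSpecial))) := by
  induction l with
  | nil => intro hu hl hd hs; simp [pvFlagLoop]
  | cons c rest ih =>
    intro hu hl hd hs
    by_cases hU : PySem.Chars.isupper c
    · simp only [pvFlagLoop, hU, if_pos, List.any_cons, ih,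
        pvUL c hU, pvUD c hU, pvUS c hU]
      cases rest <;> cases hl <;> cases hd <;> cases hs <;> simp
    · by_cases hL : PySem.Chars.islower c
      · simp only [pvFlagLoop, hU, hL, List.any_cons, ih,
          Bool.false_eq_true, pvLD c hL, pvLS c hL]
        cases rest <;> cases hu <;> cases hd <;> cases hs <;> simp
      · by_cases hD : PySem.Chars.isdigit c
        · simp only [pvFlagLoop, hU, hL, hD, List.any_cons, ih,
            Bool.false_eq_true, pvDS c hD]
          cases rest <;> cases hu <;> cases hl <;> cases hs <;> simp
        · by_cases hS : pvSpecial c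
          · simp only [pvFlagLoop, hU, hL, hD, hS, List.any_cons, ih, Bool.false_eq_true]
            cases rest <;> cases hu <;> cases hl <;> cases hd <;> simp
          · simp only [pvFlagLoop, hU, hL, hD, hS, List.any_cons, ih, Bool.false_eq_true]
            cases rest <;> cases hu <;> cases hl <;> cases hd <;> cases hs <;> simp

-- ===== VERDICT (by name: the statement is the Claim_ definition above) =====
theorem is_valid_license_key_spec : Claim_equal_is_valid_license_key := by
  intro s _
  unfold Spec_is_valid_license_key is_valid_license_key is_valid_license_key_alt
  split
  · rfl
  · rename_i h
    push Not at h
    simp [pvFlagLoop_eq, h.1]
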